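-- pv_equiv track=rewrite | github.com/horimpark/code-playground | codewars/7kyu/Drawing a Cross!.py | draw_a_cross
-- ===== SOURCE A (Python) =====
-- def draw_a_cross(n):
--     if n < 3:
--         return "Not possible to draw cross for grids less than 3x3!"
--     if n % 2 == 0:
--         return "Centered cross not possible!"
--
--     res = []
--     for x in range(int(n / 2)):
--         side_space = " " * x
--         middle_space = " " * (n - 2 * (x + 1))
--         text = f"{side_space}x{middle_space}x{side_space}"
--         res.append(text)
--
--     space = " " * int((n - 1) / 2)
--     res.append(f"{space}x{space}")
--     for x in range(len(res) - 2, -1, -1):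
--         res.append(res[x])
--     return "\n".join(res)
-- ===== SOURCE B (Python) =====
-- def draw_a_cross(n):
--     if n < 3:
--         return "Not possible to draw cross for grids less than 3x3!"
--     if n % 2 == 0:
--         return "Centered cross not possible!"
--     rows = []
--     for i in range(n):
--         row = [" "] * n
--         row[i] = "x"
--         row[n - 1 - i] = "x"
--         rows.append("".join(row))
--     return "\n".join(rows)
-- ===== Notes on version B (the rewrite author's own statement) =====
-- stated objective: simpler
-- what changed: Replaces A's build-top-half-rows / append-centre / mirror-the-list-backwards scheme with one direct pass over all n rows, each row made by blanking a length-n buffer and setting the two cross cells i and n-1-i.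
import Mathlib
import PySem

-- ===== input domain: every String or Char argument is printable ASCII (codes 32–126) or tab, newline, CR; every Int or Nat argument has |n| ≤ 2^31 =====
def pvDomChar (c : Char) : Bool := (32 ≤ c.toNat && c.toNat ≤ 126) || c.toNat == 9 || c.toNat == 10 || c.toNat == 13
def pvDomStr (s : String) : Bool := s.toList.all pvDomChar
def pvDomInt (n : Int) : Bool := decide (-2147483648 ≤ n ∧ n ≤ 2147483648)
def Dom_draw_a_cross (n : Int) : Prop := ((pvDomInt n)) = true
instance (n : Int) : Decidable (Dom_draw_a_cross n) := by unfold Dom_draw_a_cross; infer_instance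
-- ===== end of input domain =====

-- B builds the cross in one direct pass over all n rows, blanking each row and setting its two
-- cross cells i and n-1-i, instead of A's build-top-half / append-centre / mirror-back scheme; objective: simpler.


-- ===== PORT A =====
-- one row of A's top half: f"{side_space}x{middle_space}x{side_space}" (rows kept as List Char;
-- the final String.ofList ∘ Chars.join is exactly "\n".join of those row strings)
def pvRowA (n x : Int) : List Char :=
  let side_space := PySem.List.pyRepeat [' '] x
  let middle_space := PySem.List.pyRepeat [' '] (n - 2 * (x + 1))
  side_space ++ ['x'] ++ middle_space ++ ['x'] ++ side_space

def draw_a_cross (n : Int) : String :=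
  if n < 3 then "Not possible to draw cross for grids less than 3x3!"
  else if PySem.Int.mod n 2 = 0 then "Centered cross not possible!"
  else
    -- int(n / 2): for 3 ≤ n (float division exact here) this is floor division, exact
    let res := (PySem.List.pyRange 0 (PySem.Int.floordiv n 2) 1).foldl
      (fun res x => res ++ [pvRowA n x]) []
    let space := PySem.List.pyRepeat [' '] (PySem.Int.floordiv (n - 1) 2)
    let res := res ++ [space ++ ['x'] ++ space]
    let res := (PySem.List.pyRange ((res.length : Int) - 2) (-1) (-1)).foldl
      (fun acc x => acc ++ [PySem.List.pyGetD res x []]) res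
    String.ofList (PySem.Chars.join ['\n'] res)

-- ===== PORT B =====
-- B's row i: row = [" "] * n; row[i] = "x"; row[n-1-i] = "x"; "".join(row)
-- (List.set is exact for these two assignments: both indices lie in [0, n) whenever 0 <= i < n)
def pvRowB (n i : Int) : List Char :=
  ((List.replicate n.toNat ' ').set i.toNat 'x').set (n - 1 - i).toNat 'x'

def draw_a_cross_alt (n : Int) : String :=
  if n < 3 then "Not possible to draw cross for grids less than 3x3!"
  else if PySem.Int.mod n 2 = 0 then "Centered cross not possible!"
  else
    let rows := (PySem.List.pyRange 0 n 1).foldl (fun rows i => rows ++ [pvRowB n i]) []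
    String.ofList (PySem.Chars.join ['\n'] rows)

-- ===== PRECONDITION & SPEC =====
def Spec_draw_a_cross (n : Int) (out : String) : Prop := out = draw_a_cross_alt n
instance (n : Int) (out : String) : Decidable (Spec_draw_a_cross n out) := by unfold Spec_draw_a_cross; infer_instance

-- ===== CLAIM (what is proved, stated in full; the proofs are below) =====
def Claim_equal_draw_a_cross : Prop := ∀ (n : Int), Dom_draw_a_cross n → Spec_draw_a_cross n (draw_a_cross n)

-- ===== LEMMAS AND PROOFS =====

-- proof-side view of B's row: the same row written as one map over range(n)
def pvRowM (n i : Int) : List Char :=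
  (PySem.List.pyRange 0 n 1).map (fun j => if j = i ∨ j = n - 1 - i then 'x' else ' ')

-- B's two-assignments row equals the map view (both indices in range)
theorem pv_rowB_eq_M (n i : Int) (h0 : 0 ≤ i) (h1 : i < n) :
    pvRowB n i = pvRowM n i := by
  unfold pvRowB pvRowM
  apply List.ext_getElem
  · simp [PySem.List.length_pyRange_one]
  intro m hm hm'
  simp only [List.length_set, List.length_replicate] at hm
  rw [List.getElem_map, PySem.List.getElem_pyRange_one]
  rw [List.getElem_set, List.getElem_set, List.getElem_replicate]
  split_ifs <;> first | rfl | omega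

-- foldl that appends one element per step is init ++ map
theorem pv_foldl_push {α β : Type} (f : α → β) (l : List α) (init : List β) :
    l.foldl (fun r x => r ++ [f x]) init = init ++ l.map f := by
  induction l generalizing init with
  | nil => simp
  | cons a t ih => simp [List.foldl_cons, ih]

-- B's row for a top-half index 0 ≤ x < k (n = 2k+1) is exactly A's row
theorem pv_rowB_top (k x : Int) (hx0 : 0 ≤ x) (hxk : x < k) :
    pvRowM (2 * k + 1) x = pvRowA (2 * k + 1) x := by
  unfold pvRowM pvRowA
  rw [PySem.List.pyRange_one_append 0 x (2 * k + 1) hx0 (by omega),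
      PySem.List.pyRange_one_append x (x + 1) (2 * k + 1) (by omega) (by omega),
      PySem.List.pyRange_one_append (x + 1) (2 * k + 1 - 1 - x) (2 * k + 1) (by omega) (by omega),
      PySem.List.pyRange_one_append (2 * k + 1 - 1 - x) (2 * k + 1 - x) (2 * k + 1) (by omega) (by omega),
      PySem.List.pyRange_one_singleton x,
      show (2 * k + 1 - x : Int) = (2 * k + 1 - 1 - x) + 1 by ring,
      PySem.List.pyRange_one_singleton (2 * k + 1 - 1 - x)]
  simp only [List.map_append, PySem.List.pyRepeat_singleton]
  rw [List.map_congr_left (g := fun _ => ' ')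
        (l := PySem.List.pyRange 0 x 1)
        (by intro a ha; rw [PySem.List.mem_pyRange_one] at ha
            simp only [if_neg (by omega : ¬(a = x ∨ a = 2 * k + 1 - 1 - x))]),
      List.map_congr_left (g := fun _ => ' ')
        (l := PySem.List.pyRange (x + 1) (2 * k + 1 - 1 - x) 1)
        (by intro a ha; rw [PySem.List.mem_pyRange_one] at ha
            simp only [if_neg (by omega : ¬(a = x ∨ a = 2 * k + 1 - 1 - x))]),
      List.map_congr_left (g := fun _ => ' ')
        (l := PySem.List.pyRange ((2 * k + 1 - 1 - x) + 1) (2 * k + 1) 1)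
        (by intro a ha; rw [PySem.List.mem_pyRange_one] at ha
            simp only [if_neg (by omega : ¬(a = x ∨ a = 2 * k + 1 - 1 - x))])]
  simp only [List.map_const', PySem.List.length_pyRange_one, List.map_cons, List.map_nil]
  have h1 : (x - 0).toNat = x.toNat := by omega
  have h2 : (2 * k + 1 - 1 - x - (x + 1)).toNat = (2 * k + 1 - 2 * (x + 1)).toNat := by omega
  have h3 : (2 * k + 1 - ((2 * k + 1 - 1 - x) + 1)).toNat = x.toNat := by omega
  rw [h1, h2, h3]; simp

-- B's middle row is A's centre row
theorem pv_rowB_mid (k : Int) (hk : 0 ≤ k) :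
    pvRowM (2 * k + 1) k =
      PySem.List.pyRepeat [' '] k ++ ['x'] ++ PySem.List.pyRepeat [' '] k := by
  unfold pvRowM
  rw [PySem.List.pyRange_one_append 0 k (2 * k + 1) hk (by omega),
      PySem.List.pyRange_one_append k (k + 1) (2 * k + 1) (by omega) (by omega),
      PySem.List.pyRange_one_singleton k]
  simp only [List.map_append, PySem.List.pyRepeat_singleton]
  rw [List.map_congr_left (g := fun _ => ' ')
        (l := PySem.List.pyRange 0 k 1)
        (by intro a ha; rw [PySem.List.mem_pyRange_one] at ha
            simp only [if_neg (by omega : ¬(a = k ∨ a = 2 * k + 1 - 1 - k))]),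
      List.map_congr_left (g := fun _ => ' ')
        (l := PySem.List.pyRange (k + 1) (2 * k + 1) 1)
        (by intro a ha; rw [PySem.List.mem_pyRange_one] at ha
            simp only [if_neg (by omega : ¬(a = k ∨ a = 2 * k + 1 - 1 - k))])]
  simp only [List.map_const', PySem.List.length_pyRange_one, List.map_cons, List.map_nil]
  have h1 : (k - 0).toNat = k.toNat := by omega
  have h2 : (2 * k + 1 - (k + 1)).toNat = k.toNat := by omega
  rw [h1, h2]; simp

-- B's rows are symmetric: row i = row (n-1-i)
theorem pv_rowB_symm (n i : Int) : pvRowM n (n - 1 - i) = pvRowM n i := by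
  unfold pvRowM
  apply List.map_congr_left
  intro a _
  by_cases h : a = i ∨ a = n - 1 - i
  · rw [if_pos (by omega), if_pos h]
  · rw [if_neg (by omega), if_neg h]

theorem draw_a_cross_main : ∀ (n : Int), Dom_draw_a_cross n → draw_a_cross n = draw_a_cross_alt n := by
  intro n _
  unfold draw_a_cross draw_a_cross_alt
  by_cases h3 : n < 3
  · simp only [if_pos h3]
  by_cases he : PySem.Int.mod n 2 = 0
  · simp only [if_neg h3, if_pos he]
  simp only [if_neg h3, if_neg he]
  -- n is odd and ≥ 3: write n = 2k+1 with 1 ≤ k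
  have hodd : n % 2 = 1 := by
    simp only [PySem.Int.mod] at he; rw [Int.fmod_eq_emod] at he; simp at he; omega
  obtain ⟨k, hk1, hkn⟩ : ∃ k : Int, 1 ≤ k ∧ n = 2 * k + 1 := ⟨n / 2, by omega, by omega⟩
  subst hkn
  have hfd : PySem.Int.floordiv (2 * k + 1) 2 = k := by
    simp only [PySem.Int.floordiv]; rw [Int.fdiv_eq_ediv]; simp; try omega
  have hfd2 : PySem.Int.floordiv (2 * k + 1 - 1) 2 = k := by
    simp only [PySem.Int.floordiv]; rw [Int.fdiv_eq_ediv]; simp; try omega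
  rw [hfd, hfd2, pv_foldl_push, pv_foldl_push, pv_foldl_push,
      List.map_congr_left (f := pvRowB (2 * k + 1)) (g := pvRowM (2 * k + 1))
        (l := PySem.List.pyRange 0 (2 * k + 1) 1)
        (by intro a ha; rw [PySem.List.mem_pyRange_one] at ha
            exact pv_rowB_eq_M _ a ha.1 ha.2)]
  simp only [List.nil_append]
  -- name the pieces
  set center : List Char :=
    PySem.List.pyRepeat [' '] k ++ ['x'] ++ PySem.List.pyRepeat [' '] k with hcenter
  set top : List (List Char) := (PySem.List.pyRange 0 k 1).map (pvRowA (2 * k + 1)) with htop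
  have htoplen : top.length = k.toNat := by
    simp [htop, PySem.List.length_pyRange_one]
  have hreslen : ((top ++ [center]).length : Int) = k + 1 := by
    simp [htoplen]; omega
  rw [hreslen]
  -- the mirror range and the bottom rows of A
  have hmirror : ((PySem.List.pyRange (k + 1 - 2) (-1) (-1)).map
      (fun x => PySem.List.pyGetD (top ++ [center]) x [])) =
      (List.range k.toNat).map (fun j : Nat => pvRowA (2 * k + 1) (k - 1 - (j : Int))) := by
    rw [PySem.List.pyRange_neg_one]
    have hlen : (k + 1 - 2 - (-1)).toNat = k.toNat := by omega
    rw [hlen, List.map_map]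
    apply List.map_congr_left
    intro j hj
    rw [List.mem_range] at hj
    have hj' : (j : Int) < k := by omega
    simp only [Function.comp_apply]
    have hidx0 : (0 : Int) ≤ k + 1 - 2 - (j : Int) := by omega
    have hidx1 : k + 1 - 2 - (j : Int) < ((top ++ [center]).length : Int) := by
      rw [hreslen]; omega
    rw [PySem.List.pyGetD_eq_getElem _ _ hidx0 hidx1]
    have hlt : (k + 1 - 2 - (j : Int)).toNat < top.length := by omega
    rw [List.getElem_append_left hlt]
    simp only [htop, List.getElem_map, PySem.List.getElem_pyRange_one]
    congr 1
    omega
  rw [hmirror]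
  -- now the B side: split range(n) at k and k+1
  rw [PySem.List.pyRange_one_append 0 k (2 * k + 1) (by omega) (by omega),
      PySem.List.pyRange_one_append k (k + 1) (2 * k + 1) (by omega) (by omega),
      PySem.List.pyRange_one_singleton k]
  simp only [List.map_append, List.map_cons, List.map_nil]
  have hB0 : (PySem.List.pyRange 0 k 1).map (pvRowM (2 * k + 1)) = top := by
    rw [htop]
    apply List.map_congr_left
    intro x hx
    rw [PySem.List.mem_pyRange_one] at hx
    exact pv_rowB_top k x hx.1 hx.2
  have hBmid : pvRowM (2 * k + 1) k = center := by
    rw [hcenter]; exact pv_rowB_mid k (by omega)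
  have hBrest : (PySem.List.pyRange (k + 1) (2 * k + 1) 1).map (pvRowM (2 * k + 1)) =
      (List.range k.toNat).map (fun j : Nat => pvRowA (2 * k + 1) (k - 1 - (j : Int))) := by
    rw [PySem.List.pyRange_one]
    have hlen : (2 * k + 1 - (k + 1)).toNat = k.toNat := by omega
    rw [hlen, List.map_map]
    apply List.map_congr_left
    intro j hj
    rw [List.mem_range] at hj
    have hj' : (j : Int) < k := by omega
    simp only [Function.comp_apply]
    have hsym : (k + 1 + (j : Int)) = (2 * k + 1) - 1 - (k - 1 - (j : Int)) := by ring
    rw [hsym, pv_rowB_symm, pv_rowB_top k (k - 1 - (j : Int)) (by omega) (by omega)]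
  rw [hB0, hBmid, hBrest, List.append_assoc]

-- ===== VERDICT (by name: the statement is the Claim_ definition above) =====
theorem draw_a_cross_spec : Claim_equal_draw_a_cross := by
  intro n hd
  unfold Spec_draw_a_cross
  exact draw_a_cross_main n hd
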